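-- pv_equiv track=rewrite | github.com/simmarum/AdventOfCode | 2017/day-04/main.py | part_2
-- ===== SOURCE A (Python) =====
-- def part_2(inp):
--     valids = 0
--     for line in inp:
--         x = line.split()
--         x = [''.join(sorted(c)) for c in x]
--         if len(x) == len(set(x)):
--             valids += 1
--     return valids
-- ===== SOURCE B (Python) =====
-- def _has_dup(ws):
--     # recursive pairwise check: some later word equals the first, or a dup among the rest
--     if not ws:
--         return False
--     return ws[0] in ws[1:] or _has_dup(ws[1:])
--
--
-- def part_2(inp):
--     return sum(1 for line in inp
--                if not _has_dup([''.join(sorted(w)) for w in line.split()]))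
-- ===== Notes on version B (the rewrite author's own statement) =====
-- stated objective: alternative
-- what changed: Replaces A's per-line set construction and len-vs-len(set) comparison with a recursive pairwise duplicate check (first word against the rest, then recurse) and a single sum-of-generator count.
import Mathlib
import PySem

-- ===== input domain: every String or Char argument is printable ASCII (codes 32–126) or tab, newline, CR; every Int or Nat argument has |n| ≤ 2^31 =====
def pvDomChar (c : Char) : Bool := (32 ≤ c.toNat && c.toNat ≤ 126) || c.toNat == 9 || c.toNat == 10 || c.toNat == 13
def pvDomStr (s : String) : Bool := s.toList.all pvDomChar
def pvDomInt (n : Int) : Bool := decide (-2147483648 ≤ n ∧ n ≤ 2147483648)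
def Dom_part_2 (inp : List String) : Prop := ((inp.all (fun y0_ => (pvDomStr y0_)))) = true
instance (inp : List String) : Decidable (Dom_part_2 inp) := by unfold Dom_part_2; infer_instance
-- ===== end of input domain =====

-- B replaces A's per-line set construction (len(x) == len(set(x))) by a recursive pairwise
-- duplicate check and a sum-of-generator count: an alternative decomposition, not faster.

-- ===== PORT A =====
-- ''.join(sorted(w)) : join with "" of the singleton strings of the sorted characters
def canonWord (w : String) : String :=
  PySem.Str.join "" ((PySem.List.sorted w.toList (fun c => c)).map (fun c => String.ofList [c]))

def part_2 (inp : List String) : Int :=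
  inp.foldl (fun valids line =>
    let x := PySem.Str.split₀ line
    let x := x.map canonWord
    if x.length == (PySem.Set.ofList x).length then valids + 1 else valids) 0

-- ===== PORT B =====
-- _has_dup(ws): empty → False; else ws[0] in ws[1:] or _has_dup(ws[1:])
def hasDupAlt : List String → Bool
  | [] => false
  | w :: rest => rest.contains w || hasDupAlt rest

-- sum(1 for line in inp if not _has_dup([...])) = count of lines passing the test
def part_2_alt (inp : List String) : Int :=
  (inp.countP (fun line => !hasDupAlt ((PySem.Str.split₀ line).map canonWord)) : Int)

-- ===== PRECONDITION & SPEC =====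
def Spec_part_2 (inp : List String) (out : Int) : Prop := out = part_2_alt inp
instance (inp : List String) (out : Int) : Decidable (Spec_part_2 inp out) := by unfold Spec_part_2; infer_instance

-- ===== CLAIM (what is proved, stated in full; the proofs are below) =====
def Claim_equal_part_2 : Prop := ∀ (inp : List String), Dom_part_2 inp → Spec_part_2 inp (part_2 inp)

-- ===== LEMMAS AND PROOFS =====

-- len(set(ws)) counts the distinct elements of ws
lemma setLen_eq_card (ws : List String) :
    (PySem.Set.ofList ws).length = ws.toFinset.card := by
  have hnd := PySem.Set.nodup_ofList ws
  have hfs : (PySem.Set.ofList ws : List String).toFinset = ws.toFinset := by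
    apply Finset.ext; intro a; simp [List.mem_toFinset, PySem.Set.mem_ofList]
  rw [← hfs, List.toFinset_card_of_nodup hnd]

-- A's per-line test holds exactly when the list has no duplicates
lemma lenEq_iff_nodup (ws : List String) :
    (ws.length = (PySem.Set.ofList ws).length) ↔ ws.Nodup := by
  constructor
  · intro h
    rw [setLen_eq_card, List.card_toFinset] at h
    have : ws.dedup = ws := ws.dedup_sublist.eq_of_length h.symm
    rw [← this]; exact ws.nodup_dedup
  · intro h
    rw [PySem.Set.ofList_eq_self_of_nodup ws h]

-- B's per-line test holds exactly when the list has no duplicates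
lemma hasDupAlt_false_iff_nodup (ws : List String) :
    hasDupAlt ws = false ↔ ws.Nodup := by
  induction ws with
  | nil => simp [hasDupAlt]
  | cons w rest ih =>
      simp [hasDupAlt, List.nodup_cons, ih, Bool.or_eq_false_iff]

lemma tests_agree (line : String) :
    ((((PySem.Str.split₀ line).map canonWord).length ==
        (PySem.Set.ofList ((PySem.Str.split₀ line).map canonWord)).length)) =
      (!hasDupAlt ((PySem.Str.split₀ line).map canonWord)) := by
  rw [Bool.eq_iff_iff]
  simp only [beq_iff_eq, Bool.not_eq_eq_eq_not, Bool.not_true]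
  rw [lenEq_iff_nodup, ← hasDupAlt_false_iff_nodup]

-- ===== VERDICT (by name: the statement is the Claim_ definition above) =====
theorem part_2_spec : Claim_equal_part_2 := by
  intro inp _
  unfold Spec_part_2 part_2 part_2_alt
  simp only []
  rw [PySem.List.foldl_count_if
        (fun line => ((PySem.Str.split₀ line).map canonWord).length ==
          (PySem.Set.ofList ((PySem.Str.split₀ line).map canonWord)).length) inp 0]
  simp only [zero_add, Int.natCast_inj]
  exact List.countP_congr (fun line _ => by rw [tests_agree line])
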